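-- pv_equiv track=rewrite | github.com/YaroslavAggressive/Wheat_Phenotype_Prediction | image_processing/image_creation.py | snp_weather_colnames
-- ===== SOURCE A (Python) =====
-- def snp_weather_colnames(all_colnames: list, meteo_names: list) -> list:
--     """
--     Дополнительная функция разделения всех признаков растений, находящихся в таблице
--     на две семантически различные части - генетические и погодные.
--
--     :param all_colnames: полный список признаков, описывающих один образец растения
--     :param meteo_names: список названий поголных параметров
--     :return: список из двух списков, содеражщих отдельно генетические и погодные образцы соответственно
--     """
--
--     snp_columns, weather_columns = [], []
--     weather_columns = []
--     for name in all_colnames: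
--         flag = False
--         for meteo_name in meteo_names:
--             if name.startswith(meteo_name):
--                 weather_columns.append(name)
--                 flag = True
--                 break
--         if not flag:
--             snp_columns.append(name)
--     return [snp_columns, weather_columns]
-- ===== SOURCE B (Python) =====
-- def snp_weather_colnames(all_colnames: list, meteo_names: list) -> list:
--     """Split names into [snp, weather]: a name is 'weather' iff some meteo name is a prefix of it."""
--     prefix_set = set(meteo_names)
--     lengths = sorted({len(m) for m in meteo_names})
--     snp_columns, weather_columns = [], []
--     for name in all_colnames:
--         if any(name[:L] in prefix_set for L in lengths):
--             weather_columns.append(name)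
--         else:
--             snp_columns.append(name)
--     return [snp_columns, weather_columns]
-- ===== Notes on version B (the rewrite author's own statement) =====
-- stated objective: faster
-- what changed: Replaces the inner linear scan of meteo_names with a prefix hash set plus the sorted list of distinct prefix lengths: each name is classified by a handful of hashed slice lookups instead of startswith against every meteo name.
import Mathlib
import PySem

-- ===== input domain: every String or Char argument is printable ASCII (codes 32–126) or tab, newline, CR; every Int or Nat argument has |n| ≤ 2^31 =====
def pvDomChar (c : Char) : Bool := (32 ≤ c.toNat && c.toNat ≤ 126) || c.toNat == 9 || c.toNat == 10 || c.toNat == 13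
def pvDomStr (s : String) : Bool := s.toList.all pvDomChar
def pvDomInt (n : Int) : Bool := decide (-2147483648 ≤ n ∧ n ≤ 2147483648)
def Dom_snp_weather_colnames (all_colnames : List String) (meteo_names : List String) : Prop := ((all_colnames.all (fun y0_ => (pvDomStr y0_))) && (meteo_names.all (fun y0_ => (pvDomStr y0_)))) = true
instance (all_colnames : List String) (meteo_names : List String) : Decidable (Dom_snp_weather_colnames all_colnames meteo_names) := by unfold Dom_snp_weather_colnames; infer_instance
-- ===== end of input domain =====

-- B replaces A's inner startswith scan over meteo_names by a prefix hash set plus the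
-- sorted distinct prefix lengths, classifying each name by a few slice lookups (objective: faster).

-- ===== PORT A =====
-- inner 'for meteo_name in meteo_names: if name.startswith(...): flag = True; break'
def pvAflag (name : String) : List String → Bool
  | [] => false
  | m :: rest => if PySem.Str.startswith name m then true else pvAflag name rest

def snp_weather_colnames (all_colnames : List String) (meteo_names : List String) : List (List String) :=
  let p := all_colnames.foldl
    (fun (acc : List String × List String) name =>
      if pvAflag name meteo_names then (acc.1, acc.2 ++ [name]) else (acc.1 ++ [name], acc.2))
    ([], [])
  [p.1, p.2]

-- ===== PORT B =====
-- 'any(name[:L] in prefix_set for L in lengths)'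
def pvBmatch (prefix_set : PySem.Set String) (lengths : List Int) (name : String) : Bool :=
  lengths.any (fun L => PySem.Set.contains prefix_set (PySem.Str.slice name none (some L)))

def snp_weather_colnames_alt (all_colnames : List String) (meteo_names : List String) : List (List String) :=
  let prefix_set : PySem.Set String := PySem.Set.ofList meteo_names
  let lengths : List Int :=
    PySem.List.sorted (PySem.Set.ofList (meteo_names.map PySem.Str.len)) (fun x => x) false
  let p := all_colnames.foldl
    (fun (acc : List String × List String) name =>
      if pvBmatch prefix_set lengths name then (acc.1, acc.2 ++ [name]) else (acc.1 ++ [name], acc.2))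
    ([], [])
  [p.1, p.2]

-- ===== PRECONDITION & SPEC =====
def Spec_snp_weather_colnames (all_colnames : List String) (meteo_names : List String) (out : List (List String)) : Prop := out = snp_weather_colnames_alt all_colnames meteo_names
instance (all_colnames : List String) (meteo_names : List String) (out : List (List String)) : Decidable (Spec_snp_weather_colnames all_colnames meteo_names out) := by unfold Spec_snp_weather_colnames; infer_instance

-- ===== CLAIM (what is proved, stated in full; the proofs are below) =====
def Claim_equal_snp_weather_colnames : Prop := ∀ (all_colnames : List String) (meteo_names : List String), Dom_snp_weather_colnames all_colnames meteo_names → Spec_snp_weather_colnames all_colnames meteo_names (snp_weather_colnames all_colnames meteo_names)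

-- ===== LEMMAS AND PROOFS =====

lemma pvAflag_eq_any (name : String) (ms : List String) :
    pvAflag name ms = ms.any (fun m => PySem.Str.startswith name m) := by
  induction ms with
  | nil => rfl
  | cons m t ih =>
    simp only [pvAflag, List.any_cons, ih]
    split_ifs with h <;> simp_all [PySem.Str.startswith_eq]

-- the per-name tests of the two programs agree
lemma pvMatch_eq (meteo : List String) (name : String) :
    pvBmatch (PySem.Set.ofList meteo)
      (PySem.List.sorted (PySem.Set.ofList (meteo.map PySem.Str.len)) (fun x => x) false) name
    = pvAflag name meteo := by
  rw [pvAflag_eq_any, Bool.eq_iff_iff]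
  simp only [pvBmatch, List.any_eq_true,
    (PySem.List.sorted_perm (PySem.Set.ofList (meteo.map PySem.Str.len)) (fun x => x) false).mem_iff,
    PySem.Set.mem_ofList, PySem.Set.contains_iff, List.mem_map,
    PySem.Str.startswith_eq, PySem.Chars.startswith_iff]
  constructor
  · rintro ⟨L, ⟨m', _, rfl⟩, hmem⟩
    refine ⟨_, hmem, ?_⟩
    rw [PySem.Str.len_eq, PySem.Str.toList_slice, PySem.Chars.slice_eq_listSlice,
      PySem.List.slice_to_natCast]
    exact List.take_prefix _ _
  · rintro ⟨m, hm, hpre⟩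
    refine ⟨PySem.Str.len m, ⟨m, hm, rfl⟩, ?_⟩
    have hslice : PySem.Str.slice name none (some (PySem.Str.len m)) = m := by
      apply String.toList_inj.mp
      rw [PySem.Str.toList_slice, PySem.Chars.slice_eq_listSlice, PySem.Str.len_eq,
        PySem.List.slice_to_natCast]
      exact (List.prefix_iff_eq_take.mp hpre).symm
    rw [hslice]
    exact hm

-- ===== VERDICT (by name: the statement is the Claim_ definition above) =====
theorem snp_weather_colnames_spec : Claim_equal_snp_weather_colnames := by
  intro all_colnames meteo_names _
  unfold Spec_snp_weather_colnames snp_weather_colnames snp_weather_colnames_alt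
  have hfun :
      (fun (acc : List String × List String) name =>
        if pvBmatch (PySem.Set.ofList meteo_names)
            (PySem.List.sorted (PySem.Set.ofList (meteo_names.map PySem.Str.len)) (fun x => x) false)
            name
        then (acc.1, acc.2 ++ [name]) else (acc.1 ++ [name], acc.2))
      = (fun (acc : List String × List String) name =>
        if pvAflag name meteo_names then (acc.1, acc.2 ++ [name]) else (acc.1 ++ [name], acc.2)) := by
    funext acc name
    rw [pvMatch_eq]
  simp only [hfun]
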